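-- pv_equiv track=rewrite | github.com/alexandraback/datacollection | solutions_5631989306621952_0/Python/Kbo/problem_a.py | process
-- ===== SOURCE A (Python) =====
-- def process(s):
--     res = s[0]
--     for c in s[1:]:
--         if c >= res[0]:
--             res = c + res
--         else:
--             res = res + c
--     return res
-- ===== SOURCE B (Python) =====
-- def process(s):
--     # pass 1: pm[i] = max(s[:i+1]), the prefix maxima
--     pm = []
--     m = s[0]
--     for c in s:
--         if c > m:
--             m = c
--         pm.append(m)
--     # pass 2: classify each position independently against the prefix maximum before it
--     left = [c for c, m in zip(s[1:], pm) if c >= m]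
--     right = [c for c, m in zip(s[1:], pm) if c < m]
--     return ''.join(reversed(left)) + s[0] + ''.join(right)
-- ===== Notes on version B (the rewrite author's own statement) =====
-- stated objective: faster
-- what changed: A single-passes the input while maintaining the growing result string (prepend/append against its current first char); B never builds the result incrementally: a first scan precomputes the prefix-maxima array pm, then two zip-comprehensions classify each position independently by comparing it with the prefix maximum before it, and one final join assembles reversed(left)+s[0]+right.
import Mathlib
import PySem

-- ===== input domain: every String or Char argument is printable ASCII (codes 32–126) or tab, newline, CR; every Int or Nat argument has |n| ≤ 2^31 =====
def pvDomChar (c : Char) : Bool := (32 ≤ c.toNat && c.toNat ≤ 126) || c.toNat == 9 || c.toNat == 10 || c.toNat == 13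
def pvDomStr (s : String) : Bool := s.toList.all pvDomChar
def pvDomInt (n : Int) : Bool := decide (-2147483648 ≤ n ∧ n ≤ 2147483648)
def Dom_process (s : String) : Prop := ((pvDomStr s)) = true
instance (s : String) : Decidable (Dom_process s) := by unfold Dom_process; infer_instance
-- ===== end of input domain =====

-- B drops A's incremental result string: a first scan precomputes the prefix-maxima array,
-- then zip-comprehensions classify each position against it, assembled by one final join.

-- ===== PORT A =====
-- res = s[0]; for c in s[1:]: if c >= res[0]: res = c + res else: res = res + c
def processStepA (res : List Char) (c : Char) : List Char :=
  if res.headD ' ' ≤ c then c :: res else res ++ [c]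

def process (s : String) : String :=
  match s.toList with
  | [] => ""          -- Python raises IndexError here; excluded by Pre_process
  | h :: t => String.ofList (t.foldl processStepA [h])

-- ===== PORT B =====
-- pm = []; m = s[0]; for c in s: (if c > m: m = c); pm.append(m)
-- left  = [c for c, m in zip(s[1:], pm) if c >= m]
-- right = [c for c, m in zip(s[1:], pm) if c <  m]
-- return ''.join(reversed(left)) + s[0] + ''.join(right)
def pmStep (st : Char × List Char) (c : Char) : Char × List Char :=
  let m := if st.1 < c then c else st.1
  (m, st.2 ++ [m])

def process_alt (s : String) : String :=
  match s.toList with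
  | [] => ""          -- Python: m = s[0] raises IndexError here; excluded by Pre_process
  | h :: t =>
    let pm := ((h :: t).foldl pmStep (h, [])).2
    let left  := (t.zip pm).filterMap (fun p => if p.2 ≤ p.1 then some p.1 else none)
    let right := (t.zip pm).filterMap (fun p => if p.1 < p.2 then some p.1 else none)
    String.ofList (left.reverse ++ h :: right)

-- ===== PRECONDITION & SPEC =====
-- A (and B) raise IndexError on the empty string; Pre_ excludes exactly that input.
def Pre_process (s : String) : Prop := s ≠ ""
instance (s : String) : Decidable (Pre_process s) := by unfold Pre_process; infer_instance
def pvWitness_process : String := "ba"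

def Spec_process (s : String) (out : String) : Prop := out = process_alt s
instance (s : String) (out : String) : Decidable (Spec_process s out) := by unfold Spec_process; infer_instance

-- ===== CLAIM (what is proved, stated in full; the proofs are below) =====
def Claim_equal_process : Prop := ∀ (s : String), Dom_process s → Pre_process s → Spec_process s (process s)

-- ===== LEMMAS AND PROOFS =====

-- the characters that end up in front (Lrec, in prepension order) / in back (Rrec), with front f
def Lrec : List Char → Char → List Char
  | [], _ => []
  | c :: t, f => if f ≤ c then c :: Lrec t c else Lrec t f

def Rrec : List Char → Char → List Char
  | [], _ => []
  | c :: t, f => if f ≤ c then Rrec t c else c :: Rrec t f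

theorem stepA_eq (t : List Char) : ∀ (res : List Char), res ≠ [] →
    t.foldl processStepA res = (Lrec t (res.headD ' ')).reverse ++ res ++ Rrec t (res.headD ' ') := by
  induction t with
  | nil => intro res _; simp [Lrec, Rrec]
  | cons c t ih =>
    intro res hres
    obtain ⟨x, xs, rfl⟩ := List.exists_cons_of_ne_nil hres
    simp only [List.foldl_cons, processStepA, List.headD_cons, Lrec, Rrec]
    by_cases hc : x ≤ c
    · rw [if_pos hc, if_pos hc, if_pos hc, ih (c :: x :: xs) (by simp)]
      simp
    · rw [if_neg hc, if_neg hc, if_neg hc, ih ((x :: xs) ++ [c]) (by simp)]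
      simp
-- prefix maxima of t continuing from running max m
def pmL : List Char → Char → List Char
  | [], _ => []
  | c :: t, m => let m' := if m < c then c else m; m' :: pmL t m'

theorem pmFold (t : List Char) : ∀ (m : Char) (acc : List Char),
    (t.foldl pmStep (m, acc)).2 = acc ++ pmL t m := by
  induction t with
  | nil => intro m acc; simp [pmL]
  | cons c t ih =>
    intro m acc
    simp only [List.foldl_cons, pmStep, pmL]
    rw [ih]
    simp

theorem zip_left (t : List Char) : ∀ (f : Char),
    ((t.zip (f :: pmL t f)).filterMap (fun p => if p.2 ≤ p.1 then some p.1 else none)) = Lrec t f := by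
  induction t with
  | nil => intro f; simp [Lrec]
  | cons c t ih =>
    intro f
    simp only [pmL, List.zip_cons_cons, List.filterMap_cons, Lrec]
    by_cases hc : f ≤ c
    · have hm : (if f < c then c else f) = c := by
        rcases lt_or_eq_of_le hc with h | h
        · rw [if_pos h]
        · simp [h]
      rw [hm, if_pos hc, if_pos hc, ih c]
    · have hm : (if f < c then c else f) = f := by rw [if_neg (fun h => hc (le_of_lt h))]
      rw [hm, if_neg hc, if_neg hc, ih f]

theorem zip_right (t : List Char) : ∀ (f : Char),
    ((t.zip (f :: pmL t f)).filterMap (fun p => if p.1 < p.2 then some p.1 else none)) = Rrec t f := by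
  induction t with
  | nil => intro f; simp [Rrec]
  | cons c t ih =>
    intro f
    simp only [pmL, List.zip_cons_cons, List.filterMap_cons, Rrec]
    by_cases hc : f ≤ c
    · have hm : (if f < c then c else f) = c := by
        rcases lt_or_eq_of_le hc with h | h
        · rw [if_pos h]
        · simp [h]
      rw [hm, if_neg (not_lt.mpr hc), if_pos hc, ih c]
    · have hm : (if f < c then c else f) = f := by rw [if_neg (fun h => hc (le_of_lt h))]
      rw [hm, if_pos (lt_of_not_ge hc), if_neg hc, ih f]

-- ===== VERDICT (by name: the statement is the Claim_ definition above) =====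
theorem process_spec : Claim_equal_process := by
  intro s _ hp
  unfold Spec_process process process_alt
  cases hs : s.toList with
  | nil => exact absurd (by cases s; simp_all) hp
  | cons h t =>
    simp only
    have hpm : ((h :: t).foldl pmStep (h, [])).2 = h :: pmL t h := by
      rw [pmFold]
      simp [pmL]
    rw [hpm, zip_left t h, zip_right t h, stepA_eq t [h] (by simp)]
    simp
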